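-- pv_equiv track=rewrite | github.com/vinchinzu/euler | python/782/verify_n20.py | get_comp2_k_values
-- ===== SOURCE A (Python) =====
-- def get_comp2_k_values(n):
--     achievable = set()
--     for a in range(n+1):
--         for b in range(n+1-a):
--             for c in range(n+1-a-b):
--                 d = n - a - b - c
--                 if c == 0 and d == 0:
--                     continue
--                 zero_is_P = (b + c == 0)
--                 zero_is_Q = (b + d == 0)
--                 ones_is_P = (a + d == 0)
--                 ones_is_Q = (a + c == 0)
--                 if a > 0 and not (zero_is_P or zero_is_Q):
--                     continue
--                 if b > 0 and not (ones_is_P or ones_is_Q):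
--                     continue
--                 possible_s = set()
--                 if c > 0 and d > 0:
--                     for sc in ['P', 'Q']:
--                         for cc in ['P', 'Q']:
--                             s1 = (b + c) if sc == 'P' else (b + d)
--                             s2 = (a + d) if cc == 'P' else (a + c)
--                             if s1 == s2:
--                                 possible_s.add(s1)
--                 elif c > 0:
--                     possible_s.add(b + c)
--                     possible_s.add(b + d)
--                 elif d > 0:
--                     possible_s.add(a + d)
--                     possible_s.add(a + c)
--                 for s in possible_s:
--                     if 0 <= s <= n:
--                         k = s * (b + c) + (n - s) * (b + d)
--                         if 0 < k < n * n:
--                             achievable.add(k)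
--                         k_comp = n * n - k
--                         if 0 < k_comp < n * n:
--                             achievable.add(k_comp)
--     return achievable
-- ===== SOURCE B (Python) =====
-- def get_comp2_k_values(n):
--     # O(n) enumeration: only the (a,b,c,d) configurations that survive A's
--     # pruning constraints (at most one of a,b nonzero; then one of c,d zero).
--     achievable = set()
--
--     def emit(a, b, c, d):
--         if c == 0 and d == 0:
--             return
--         possible_s = set()
--         if c > 0 and d > 0:
--             for sc in ['P', 'Q']:
--                 for cc in ['P', 'Q']:
--                     s1 = (b + c) if sc == 'P' else (b + d)
--                     s2 = (a + d) if cc == 'P' else (a + c)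
--                     if s1 == s2:
--                         possible_s.add(s1)
--         elif c > 0:
--             possible_s.add(b + c)
--             possible_s.add(b + d)
--         elif d > 0:
--             possible_s.add(a + d)
--             possible_s.add(a + c)
--         for s in possible_s:
--             if 0 <= s <= n:
--                 k = s * (b + c) + (n - s) * (b + d)
--                 if 0 < k < n * n:
--                     achievable.add(k)
--                 k_comp = n * n - k
--                 if 0 < k_comp < n * n:
--                     achievable.add(k_comp)
--
--     for c in range(n + 1):
--         emit(0, 0, c, n - c)
--     for b in range(1, n + 1):
--         emit(0, b, 0, n - b)
--         emit(0, b, n - b, 0)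
--     for a in range(1, n + 1):
--         emit(a, 0, 0, n - a)
--         emit(a, 0, n - a, 0)
--     return achievable
-- ===== Notes on version B (the rewrite author's own statement) =====
-- stated objective: faster
-- what changed: Instead of scanning all O(n^3) compositions (a,b,c,d) of n and pruning, B enumerates directly the O(n) configurations that survive A's pruning constraints (at most one of a,b nonzero, and then one of c,d zero): three single loops over c, b and a.
import Mathlib
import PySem

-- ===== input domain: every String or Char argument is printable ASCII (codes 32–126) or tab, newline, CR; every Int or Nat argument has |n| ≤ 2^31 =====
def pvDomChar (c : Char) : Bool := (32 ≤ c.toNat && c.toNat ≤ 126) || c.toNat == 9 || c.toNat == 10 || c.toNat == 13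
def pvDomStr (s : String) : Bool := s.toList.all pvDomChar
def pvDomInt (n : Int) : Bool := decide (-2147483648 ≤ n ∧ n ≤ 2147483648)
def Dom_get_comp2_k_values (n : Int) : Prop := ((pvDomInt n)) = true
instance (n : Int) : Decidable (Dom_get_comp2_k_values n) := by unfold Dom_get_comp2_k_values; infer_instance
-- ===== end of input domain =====

-- B replaces A's O(n^3) scan over all compositions of n by a direct O(n) enumeration of the
-- configurations surviving A's pruning; return values are equal (both build the same set).

-- ===== PORT A =====
-- Shared inner body: A's code from 'possible_s = set()' through the 'for s in possible_s' loop.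
-- B's emit() helper contains this identical code, so the transliteration is shared by both ports.
def pvEmitCore (n a b c d : Int) (achievable : PySem.Set Int) : PySem.Set Int :=
  let possible_s : PySem.Set Int :=
    if c > 0 ∧ d > 0 then
      (["P", "Q"]).foldl (fun ps sc =>
        (["P", "Q"]).foldl (fun ps cc =>
          let s1 := if sc = "P" then b + c else b + d
          let s2 := if cc = "P" then a + d else a + c
          if s1 = s2 then PySem.Set.add ps s1 else ps) ps) PySem.Set.empty
    else if c > 0 then
      PySem.Set.add (PySem.Set.add PySem.Set.empty (b + c)) (b + d)
    else if d > 0 then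
      PySem.Set.add (PySem.Set.add PySem.Set.empty (a + d)) (a + c)
    else PySem.Set.empty
  possible_s.foldl (fun achievable s =>
    if 0 ≤ s ∧ s ≤ n then
      let k := s * (b + c) + (n - s) * (b + d)
      let achievable := if 0 < k ∧ k < n * n then PySem.Set.add achievable k else achievable
      let k_comp := n * n - k
      if 0 < k_comp ∧ k_comp < n * n then PySem.Set.add achievable k_comp else achievable
    else achievable) achievable

-- zero_is_P = (b+c = 0), zero_is_Q = (b+d = 0), ones_is_P = (a+d = 0), ones_is_Q = (a+c = 0)
-- are inlined into the two guard conditions below.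
def get_comp2_k_values (n : Int) : List Int :=
  (PySem.List.pyRange 0 (n+1) 1).foldl (fun achievable a =>
    (PySem.List.pyRange 0 (n+1-a) 1).foldl (fun achievable b =>
      (PySem.List.pyRange 0 (n+1-a-b) 1).foldl (fun achievable c =>
        let d := n - a - b - c
        if c = 0 ∧ d = 0 then achievable
        else if a > 0 ∧ ¬(b + c = 0 ∨ b + d = 0) then achievable
        else if b > 0 ∧ ¬(a + d = 0 ∨ a + c = 0) then achievable
        else pvEmitCore n a b c d achievable) achievable) achievable) PySem.Set.empty

-- ===== PORT B =====
def pvEmit (n a b c d : Int) (achievable : PySem.Set Int) : PySem.Set Int :=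
  if c = 0 ∧ d = 0 then achievable else pvEmitCore n a b c d achievable

def get_comp2_k_values_alt (n : Int) : List Int :=
  let acc1 := (PySem.List.pyRange 0 (n+1) 1).foldl
    (fun acc c => pvEmit n 0 0 c (n - c) acc) PySem.Set.empty
  let acc2 := (PySem.List.pyRange 1 (n+1) 1).foldl
    (fun acc b => pvEmit n 0 b (n - b) 0 (pvEmit n 0 b 0 (n - b) acc)) acc1
  (PySem.List.pyRange 1 (n+1) 1).foldl
    (fun acc a => pvEmit n a 0 (n - a) 0 (pvEmit n a 0 0 (n - a) acc)) acc2

-- ===== PRECONDITION & SPEC =====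
def Spec_get_comp2_k_values (n : Int) (out : List Int) : Prop := out = get_comp2_k_values_alt n
instance (n : Int) (out : List Int) : Decidable (Spec_get_comp2_k_values n out) := by unfold Spec_get_comp2_k_values; infer_instance

-- ===== CLAIM (what is proved, stated in full; the proofs are below) =====
def Claim_equal_get_comp2_k_values : Prop := ∀ (n : Int), Dom_get_comp2_k_values n → Spec_get_comp2_k_values n (get_comp2_k_values n)

-- ===== LEMMAS AND PROOFS =====

-- A's three 'continue' guards, as one keep-predicate over a configuration (a,b,c) (d = n-a-b-c).
def pvKeep (n : Int) (t : Int × Int × Int) : Bool :=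
  decide (¬(t.2.2 = 0 ∧ n - t.1 - t.2.1 - t.2.2 = 0)
    ∧ ¬(t.1 > 0 ∧ ¬(t.2.1 + t.2.2 = 0 ∨ t.2.1 + (n - t.1 - t.2.1 - t.2.2) = 0))
    ∧ ¬(t.2.1 > 0 ∧ ¬(t.1 + (n - t.1 - t.2.1 - t.2.2) = 0 ∨ t.1 + t.2.2 = 0)))

-- B's only guard (the 'c == 0 and d == 0' skip).
def pvKeepB (n : Int) (t : Int × Int × Int) : Bool :=
  decide (¬(t.2.2 = 0 ∧ n - t.1 - t.2.1 - t.2.2 = 0))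

def pvStep (n : Int) (acc : PySem.Set Int) (t : Int × Int × Int) : PySem.Set Int :=
  pvEmitCore n t.1 t.2.1 t.2.2 (n - t.1 - t.2.1 - t.2.2) acc

def pvConfigsA (n : Int) : List (Int × Int × Int) :=
  (PySem.List.pyRange 0 (n+1) 1).flatMap (fun a =>
    (PySem.List.pyRange 0 (n+1-a) 1).flatMap (fun b =>
      (PySem.List.pyRange 0 (n+1-a-b) 1).map (fun c => (a, b, c))))

def pvConfigsB (n : Int) : List (Int × Int × Int) :=
  (PySem.List.pyRange 0 (n+1) 1).map (fun c => ((0:Int), (0:Int), c))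
  ++ (PySem.List.pyRange 1 (n+1) 1).flatMap (fun b => [((0:Int), b, (0:Int)), (0, b, n - b)])
  ++ (PySem.List.pyRange 1 (n+1) 1).flatMap (fun a => [(a, (0:Int), (0:Int)), (a, 0, n - a)])

-- the common canonical list of surviving configurations
def pvCanon (n : Int) : List (Int × Int × Int) :=
  (if n = 0 then [] else (PySem.List.pyRange 0 (n+1) 1).map (fun c => ((0:Int), (0:Int), c)))
  ++ (PySem.List.pyRange 1 (n+1) 1).flatMap
      (fun b => if n - b = 0 then [] else [((0:Int), b, (0:Int)), (0, b, n - b)])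
  ++ (PySem.List.pyRange 1 (n+1) 1).flatMap
      (fun a => if n - a = 0 then [] else [(a, (0:Int), (0:Int)), (a, 0, n - a)])

lemma pv_bodyA (n a b c : Int) (acc : PySem.Set Int) :
    (let d := n - a - b - c
     if c = 0 ∧ d = 0 then acc
     else if a > 0 ∧ ¬(b + c = 0 ∨ b + d = 0) then acc
     else if b > 0 ∧ ¬(a + d = 0 ∨ a + c = 0) then acc
     else pvEmitCore n a b c d acc)
    = if pvKeep n (a, b, c) then pvStep n acc (a, b, c) else acc := by
  simp only [pvKeep, pvStep, decide_eq_true_eq]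
  split_ifs <;> first | rfl | tauto

lemma pv_shapeA (n : Int) :
    get_comp2_k_values n = ((pvConfigsA n).filter (pvKeep n)).foldl (pvStep n) PySem.Set.empty := by
  rw [List.foldl_filter]
  unfold pvConfigsA get_comp2_k_values
  rw [List.foldl_flatMap]
  apply PySem.List.foldl_congr_mem
  intro acc a _
  rw [List.foldl_flatMap]
  apply PySem.List.foldl_congr_mem
  intro acc' b _
  rw [List.foldl_map]
  apply PySem.List.foldl_congr_mem
  intro acc'' c _
  exact pv_bodyA n a b c acc''

lemma pv_bodyB (n a b c d : Int) (hd : d = n - a - b - c) (acc : PySem.Set Int) :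
    pvEmit n a b c d acc
    = if pvKeepB n (a, b, c) then pvStep n acc (a, b, c) else acc := by
  subst hd
  simp only [pvEmit, pvKeepB, pvStep, decide_eq_true_eq]
  split_ifs <;> rfl

lemma pv_shapeB (n : Int) :
    get_comp2_k_values_alt n
    = ((pvConfigsB n).filter (pvKeepB n)).foldl (pvStep n) PySem.Set.empty := by
  rw [List.foldl_filter]
  unfold pvConfigsB get_comp2_k_values_alt
  rw [List.foldl_append, List.foldl_append, List.foldl_map, List.foldl_flatMap, List.foldl_flatMap]
  simp only []
  congr 1
  · funext acc a
    simp only [List.foldl_cons, List.foldl_nil]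
    rw [pv_bodyB n a 0 0 (n - a) (by ring), pv_bodyB n a 0 (n - a) 0 (by ring)]
  congr 1
  · funext acc b
    simp only [List.foldl_cons, List.foldl_nil]
    rw [pv_bodyB n 0 b 0 (n - b) (by ring), pv_bodyB n 0 b (n - b) 0 (by ring)]
  congr 1
  funext acc c
  rw [pv_bodyB n 0 0 c (n - c) (by ring)]

-- middle-only filter over a full 0..M range: keeps exactly the two borders (none when M = 0)
lemma pv_filt_mid (M : Int) (hM : 0 ≤ M) (p : Int → Bool)
    (hp : ∀ c, 0 ≤ c → c ≤ M → (p c = true ↔ (M - c = 0 ∨ c = 0) ∧ ¬(c = 0 ∧ M - c = 0))) :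
    (PySem.List.pyRange 0 (M+1) 1).filter p = if M = 0 then [] else [0, M] := by
  by_cases hM0 : M = 0
  · subst hM0
    have h0 : p 0 = false := by
      have := hp 0 le_rfl le_rfl
      simp at this; simp [this]
    rw [PySem.List.pyRange_one_singleton 0]
    simp [h0]
  · rw [PySem.List.pyRange_one_append 0 1 (M+1) (by omega) (by omega),
        PySem.List.pyRange_one_append 1 M (M+1) (by omega) (by omega)]
    have e0 : PySem.List.pyRange 0 1 1 = [0] := by
      simpa using PySem.List.pyRange_one_singleton (0:Int)
    have eM : PySem.List.pyRange M (M+1) 1 = [M] := PySem.List.pyRange_one_singleton M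
    rw [e0, eM, List.filter_append, List.filter_append]
    have hmid : (PySem.List.pyRange 1 M 1).filter p = [] := by
      apply List.filter_eq_nil_iff.mpr
      intro c hc
      rw [PySem.List.mem_pyRange_one] at hc
      have := hp c (by omega) (by omega)
      simp [this]; omega
    have hp0 : p 0 = true := by
      have := hp 0 le_rfl hM
      simp at this; simp [this]; omega
    have hpM : p M = true := by
      have := hp M hM le_rfl
      simp at this; simp [this]; omega
    simp [hmid, List.filter, hp0, hpM, hM0]

-- a=b=0 piece: everything survives unless n = 0
lemma pv_filt_all (n : Int) (hn : 0 ≤ n) (p : Int → Bool)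
    (hp : ∀ c, 0 ≤ c → c ≤ n → (p c = true ↔ ¬(c = 0 ∧ n - c = 0))) :
    (PySem.List.pyRange 0 (n+1) 1).filter p
    = if n = 0 then [] else PySem.List.pyRange 0 (n+1) 1 := by
  by_cases h0 : n = 0
  · subst h0
    have hp0 : p 0 = false := by
      have := hp 0 le_rfl le_rfl
      simp at this; simp [this]
    rw [PySem.List.pyRange_one_singleton 0]
    simp [hp0]
  · rw [if_neg h0]
    apply List.filter_eq_self.mpr
    intro c hc
    rw [PySem.List.mem_pyRange_one] at hc
    have := hp c (by omega) (by omega)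
    simp [this]; omega

lemma pv_filterA (n : Int) : (pvConfigsA n).filter (pvKeep n) = pvCanon n := by
  unfold pvConfigsA pvCanon
  rcases lt_or_ge n 0 with hn | hn
  · simp only [PySem.List.pyRange_one_eq_nil (show n+1 ≤ (0:Int) by omega),
      PySem.List.pyRange_one_eq_nil (show n+1 ≤ (1:Int) by omega)]
    simp [show n ≠ 0 by omega]
  · have h0b0 : ((PySem.List.pyRange 0 (n+1) 1).map (fun c => ((0:Int), (0:Int), c))).filter
        (pvKeep n)
        = if n = 0 then [] else (PySem.List.pyRange 0 (n+1) 1).map (fun c => ((0:Int), (0:Int), c)) := by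
      rw [List.filter_map,
          pv_filt_all n hn _ (by
            intro c hc1 hc2
            simp [pvKeep]
            omega)]
      by_cases h : n = 0 <;> simp [h]
    have h0b : ∀ b : Int, 1 ≤ b → b < n + 1 →
        ((PySem.List.pyRange 0 (n+1-b) 1).map (fun c => ((0:Int), b, c))).filter (pvKeep n)
        = if n - b = 0 then [] else [((0:Int), b, 0), (0, b, n - b)] := by
      intro b hb1 hb2
      rw [List.filter_map, show n + 1 - b = (n - b) + 1 by ring,
          pv_filt_mid (n - b) (by omega) _ (by
            intro c hc1 hc2
            simp [pvKeep]
            omega)]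
      by_cases h : n - b = 0 <;> simp [h]
    have ha : ∀ a : Int, 1 ≤ a → a < n + 1 →
        ((PySem.List.pyRange 0 (n+1-a) 1).flatMap (fun b =>
          (PySem.List.pyRange 0 (n+1-a-b) 1).map (fun c => (a, b, c)))).filter (pvKeep n)
        = if n - a = 0 then [] else [(a, (0:Int), (0:Int)), (a, 0, n - a)] := by
      intro a ha1 ha2
      rw [List.filter_flatMap]
      conv_lhs => rw [PySem.List.pyRange_one_cons (show (0:Int) < n+1-a by omega),
        List.flatMap_cons]
      have hrest : (PySem.List.pyRange (0+1) (n+1-a) 1).flatMap (fun b =>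
          ((PySem.List.pyRange 0 (n+1-a-b) 1).map (fun c => (a, b, c))).filter (pvKeep n))
          = [] := by
        apply List.flatMap_eq_nil_iff.mpr
        intro b hb
        rw [PySem.List.mem_pyRange_one] at hb
        apply List.filter_eq_nil_iff.mpr
        intro t ht
        rw [List.mem_map] at ht
        obtain ⟨c, hc, rfl⟩ := ht
        rw [PySem.List.mem_pyRange_one] at hc
        simp [pvKeep]
        omega
      rw [hrest, List.append_nil, List.filter_map, show n + 1 - a - 0 = (n - a) + 1 by ring,
          pv_filt_mid (n - a) (by omega) _ (by
            intro c hc1 hc2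
            simp [pvKeep]
            omega)]
      by_cases h : n - a = 0 <;> simp [h]
    rw [List.filter_flatMap]
    conv_lhs => rw [PySem.List.pyRange_one_cons (show (0:Int) < n+1 by omega), List.flatMap_cons]
    rw [List.filter_flatMap]
    conv_lhs => rw [PySem.List.pyRange_one_cons (show (0:Int) < n+1-0 by omega), List.flatMap_cons]
    simp only [zero_add, sub_zero]
    congr 1
    · rw [h0b0]
      congr 1
      refine List.flatMap_congr ?_
      intro b hb
      rw [PySem.List.mem_pyRange_one] at hb
      exact h0b b (by omega) (by omega)
    · refine List.flatMap_congr ?_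
      intro a hamem
      rw [PySem.List.mem_pyRange_one] at hamem
      exact ha a (by omega) (by omega)

lemma pv_filterB (n : Int) : (pvConfigsB n).filter (pvKeepB n) = pvCanon n := by
  unfold pvConfigsB pvCanon
  rcases lt_or_ge n 0 with hn | hn
  · simp only [PySem.List.pyRange_one_eq_nil (show n+1 ≤ (0:Int) by omega),
      PySem.List.pyRange_one_eq_nil (show n+1 ≤ (1:Int) by omega)]
    simp [show n ≠ 0 by omega]
  · rw [List.filter_append, List.filter_append]
    congr 1
    · congr 1
      · rw [List.filter_map,
            pv_filt_all n hn _ (by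
              intro c hc1 hc2
              simp [pvKeepB]
              omega)]
        by_cases h : n = 0 <;> simp [h]
      · rw [List.filter_flatMap]
        refine List.flatMap_congr ?_
        intro b hb
        rw [PySem.List.mem_pyRange_one] at hb
        by_cases h : n - b = 0
        · rw [if_pos h]
          apply List.filter_eq_nil_iff.mpr
          intro t ht
          rcases List.mem_pair.mp ht with rfl | rfl <;>
            · simp [pvKeepB]
              omega
        · rw [if_neg h]
          apply List.filter_eq_self.mpr
          intro t ht
          rcases List.mem_pair.mp ht with rfl | rfl <;>
            · simp [pvKeepB]
              omega
    · rw [List.filter_flatMap]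
      refine List.flatMap_congr ?_
      intro a hamem
      rw [PySem.List.mem_pyRange_one] at hamem
      by_cases h : n - a = 0
      · rw [if_pos h]
        apply List.filter_eq_nil_iff.mpr
        intro t ht
        rcases List.mem_pair.mp ht with rfl | rfl <;>
          · simp [pvKeepB]
            omega
      · rw [if_neg h]
        apply List.filter_eq_self.mpr
        intro t ht
        rcases List.mem_pair.mp ht with rfl | rfl <;>
          · simp [pvKeepB]
            omega

-- ===== VERDICT (by name: the statement is the Claim_ definition above) =====
theorem get_comp2_k_values_spec : Claim_equal_get_comp2_k_values := by
  intro n _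
  unfold Spec_get_comp2_k_values
  rw [pv_shapeA, pv_shapeB, pv_filterA, pv_filterB]
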